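-- pv_equiv track=rewrite | github.com/blues/note-python | scripts/generate_apis.py | convert_to_imperative_mood
-- ===== SOURCE A (Python) =====
-- def convert_to_imperative_mood(text: str) -> str:
--     """Convert docstring text to imperative mood using built-in replacements (Pydocstyle D402)."""
--     if not text:
--         return text
--
--     # Built-in replacements for converting docstrings to imperative mood
--     replacements = {
--         "Returns": "Return",
--         "Configures": "Configure",
--         "Performs": "Perform",
--         "Used": "Use",
--         "Uses": "Use",
--         "Sets": "Set",
--         "Gets": "Get",
--         "Retrieves": "Retrieve",
--         "Displays": "Display",
--         "Adds": "Add",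
--         "Enables": "Enable",
--         "Provides": "Provide",
--         "Deletes": "Delete",
--         "Updates": "Update",
--         "Calculates": "Calculate",
--         "Specifies": "Specify",
--         "Determines": "Determine",
--         "The": "Use",
--         "This": "Use"
--     }
--
--     # Apply replacements - only replace at the start of sentences
--     for non_imperative, imperative in replacements.items():
--         # Replace at the beginning of the text
--         if text.startswith(non_imperative + " "):
--             text = imperative + text[len(non_imperative):]
--             break
--         # Also handle cases where the non-imperative word starts the text
--         elif text.startswith(non_imperative):
--             # Make sure we're not replacing part of a larger word
--             if len(text) == len(non_imperative) or not text[len(non_imperative)].isalpha():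
--                 text = imperative + text[len(non_imperative):]
--                 break
--
--     return text
-- ===== SOURCE B (Python) =====
-- _USE = ("Used", "Uses", "The", "This")
--
-- _DROP_S = ("Returns", "Configures", "Performs", "Sets", "Gets", "Retrieves",
--            "Displays", "Adds", "Enables", "Provides", "Deletes", "Updates",
--            "Calculates", "Determines")
--
--
-- def _replacement(word):
--     """Imperative form of a leading docstring word, or None if it needs none."""
--     if word in _USE:
--         return "Use"
--     if word == "Specifies":
--         return "Specify"
--     if word in _DROP_S:
--         return word[:-1]
--     return None
--
--
-- def convert_to_imperative_mood(text: str) -> str: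
--     """Convert docstring text to imperative mood using built-in replacements (Pydocstyle D402)."""
--     if not text:
--         return text
--     i = 0
--     while i < len(text) and text[i].isalpha():
--         i += 1
--     repl = _replacement(text[:i])
--     if repl is not None:
--         return repl + text[i:]
--     return text
-- ===== Notes on version B (the rewrite author's own statement) =====
-- stated objective: simpler
-- what changed: B extracts the maximal leading alphabetic word once and maps it through a morphological rule (four words map to 'Use', 'Specifies' to 'Specify', the remaining third-person verbs just drop their final 's'), instead of A's loop testing every pair of a 19-entry replacement table with two startswith checks and a boundary test.
import Mathlib
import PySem

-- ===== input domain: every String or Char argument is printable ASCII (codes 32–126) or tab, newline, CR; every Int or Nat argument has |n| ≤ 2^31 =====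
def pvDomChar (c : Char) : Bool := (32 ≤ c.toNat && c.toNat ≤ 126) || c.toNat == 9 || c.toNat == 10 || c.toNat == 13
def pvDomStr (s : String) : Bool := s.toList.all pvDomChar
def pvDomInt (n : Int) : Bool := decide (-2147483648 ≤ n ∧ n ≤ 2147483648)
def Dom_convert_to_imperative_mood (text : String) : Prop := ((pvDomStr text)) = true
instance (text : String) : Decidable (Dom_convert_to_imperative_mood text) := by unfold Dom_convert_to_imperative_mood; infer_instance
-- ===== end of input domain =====

-- B extracts the leading alphabetic word once and maps it through a small morphological
-- rule (Use-words, Specifies→Specify, drop a final 's'), replacing A's scan over a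
-- 19-entry replacement table (objective: simpler).

-- ===== PORT A =====
-- the dict literal, iterated by A's loop in insertion order (dict.items())
def replacementsA : List (List Char × List Char) :=
  [("Returns".toList, "Return".toList),
   ("Configures".toList, "Configure".toList),
   ("Performs".toList, "Perform".toList),
   ("Used".toList, "Use".toList),
   ("Uses".toList, "Use".toList),
   ("Sets".toList, "Set".toList),
   ("Gets".toList, "Get".toList),
   ("Retrieves".toList, "Retrieve".toList),
   ("Displays".toList, "Display".toList),
   ("Adds".toList, "Add".toList),
   ("Enables".toList, "Enable".toList),
   ("Provides".toList, "Provide".toList),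
   ("Deletes".toList, "Delete".toList),
   ("Updates".toList, "Update".toList),
   ("Calculates".toList, "Calculate".toList),
   ("Specifies".toList, "Specify".toList),
   ("Determines".toList, "Determine".toList),
   ("The".toList, "Use".toList),
   ("This".toList, "Use".toList)]

-- A's for-loop with break: first branch = startswith(k + " "); elif startswith(k) with the
-- word-boundary test text[len(k)].isalpha() (text[len(k)] via pyGet?; text[len(k):] with a
-- nonnegative in-range start is List.drop — exact); no break → continue with the rest.
def loopA (t : List Char) : List (List Char × List Char) → List Char
  | [] => t
  | (k, v) :: rest =>
    if PySem.Chars.startswith t (k ++ [' ']) then v ++ t.drop k.length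
    else if PySem.Chars.startswith t k then
      if (t.length == k.length) || !(Option.all PySem.Chars.isalpha (PySem.List.pyGet? t (k.length : Int))) then
        v ++ t.drop k.length
      else loopA t rest
    else loopA t rest

def convert_to_imperative_mood (text : String) : String :=
  if PySem.Str.len text = 0 then text
  else String.ofList (loopA text.toList replacementsA)

-- ===== PORT B =====
def useWords : List (List Char) :=
  ["Used".toList, "Uses".toList, "The".toList, "This".toList]

def dropSWords : List (List Char) :=
  ["Returns".toList, "Configures".toList, "Performs".toList, "Sets".toList,
   "Gets".toList, "Retrieves".toList, "Displays".toList, "Adds".toList,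
   "Enables".toList, "Provides".toList, "Deletes".toList, "Updates".toList,
   "Calculates".toList, "Determines".toList]

-- Source B's _replacement: membership rules; word[:-1] is dropLast (exact for any list)
def replacementFor (word : List Char) : Option (List Char) :=
  if word ∈ useWords then some "Use".toList
  else if word = "Specifies".toList then some "Specify".toList
  else if word ∈ dropSWords then some word.dropLast
  else none

-- Source B: the while-loop advances i over the leading run of alphabetic characters
-- (= length of takeWhile isalpha); text[:i]/text[i:] with 0 ≤ i are take/drop (exact).
def convert_to_imperative_mood_alt (text : String) : String :=
  if PySem.Str.len text = 0 then text
  else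
    let t := text.toList
    let i := (t.takeWhile PySem.Chars.isalpha).length
    match replacementFor (t.take i) with
    | some repl => String.ofList (repl ++ t.drop i)
    | none => text

-- ===== PRECONDITION & SPEC =====
def Spec_convert_to_imperative_mood (text : String) (out : String) : Prop := out = convert_to_imperative_mood_alt text
instance (text : String) (out : String) : Decidable (Spec_convert_to_imperative_mood text out) := by unfold Spec_convert_to_imperative_mood; infer_instance

-- ===== CLAIM (what is proved, stated in full; the proofs are below) =====
def Claim_equal_convert_to_imperative_mood : Prop := ∀ (text : String), Dom_convert_to_imperative_mood text → Spec_convert_to_imperative_mood text (convert_to_imperative_mood text)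

-- ===== LEMMAS AND PROOFS =====

-- A's first branch (startswith (k + " ")) forces the leading alphabetic word to be exactly k.
lemma cond1_word (t k : List Char) (hk : ∀ c ∈ k, PySem.Chars.isalpha c = true)
    (h : PySem.Chars.startswith t (k ++ [' ']) = true) :
    t.takeWhile PySem.Chars.isalpha = k := by
  obtain ⟨r, hr⟩ := (PySem.Chars.startswith_iff _ _).mp h
  subst hr
  have hsp : PySem.Chars.isalpha ' ' = false := by decide
  rw [List.append_assoc, List.takeWhile_append_of_pos hk, List.singleton_append,
    List.takeWhile_cons, hsp]
  simp

-- A's elif branch (startswith k, with the boundary test) holds iff the leading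
-- alphabetic word is exactly k.
lemma cond2_word (t k : List Char) (hk : ∀ c ∈ k, PySem.Chars.isalpha c = true) :
    (PySem.Chars.startswith t k &&
      ((t.length == k.length) || !(Option.all PySem.Chars.isalpha (PySem.List.pyGet? t (k.length : Int))))) = true
    ↔ t.takeWhile PySem.Chars.isalpha = k := by
  constructor
  · intro h
    rw [Bool.and_eq_true] at h
    obtain ⟨r, hr⟩ := (PySem.Chars.startswith_iff _ _).mp h.1
    subst hr
    rcases Bool.or_eq_true_iff.mp h.2 with hlen | hget
    · have h' : (k ++ r).length = k.length := by simpa using hlen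
      rw [List.length_append] at h'
      have hr0 : r = [] := List.eq_nil_of_length_eq_zero (by omega)
      subst hr0
      simp [List.takeWhile_eq_self_iff.mpr hk]
    · have hget' : PySem.List.pyGet? (k ++ r) ((k.length : Nat) : Int) = r[0]? := by
        rw [PySem.List.pyGet?_natCast]
        rw [List.getElem?_append_right (Nat.le_refl _)]
        simp
      rw [hget'] at hget
      cases r with
      | nil => simp [Option.all] at hget
      | cons c r' =>
        simp only [List.getElem?_cons_zero, Option.all, Bool.not_eq_true'] at hget
        rw [List.takeWhile_append_of_pos hk, List.takeWhile_cons, hget]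
        simp
  · intro hw
    have hpre : t.takeWhile PySem.Chars.isalpha <+: t := List.takeWhile_prefix _
    rw [hw] at hpre
    rw [Bool.and_eq_true]
    refine ⟨(PySem.Chars.startswith_iff _ _).mpr hpre, ?_⟩
    have hsplit : k ++ t.dropWhile PySem.Chars.isalpha = t := by
      conv_rhs => rw [← List.takeWhile_append_dropWhile (p := PySem.Chars.isalpha) (l := t)]
      rw [hw]
    rw [Bool.or_eq_true_iff]
    cases hd : t.dropWhile PySem.Chars.isalpha with
    | nil =>
      left
      rw [hd] at hsplit
      simp [← hsplit]
    | cons c d' =>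
      right
      have hc : PySem.Chars.isalpha c = false := by
        have := List.head_dropWhile_not PySem.Chars.isalpha (l := t) (by simp [hd])
        simpa [hd] using this
      have hsome : PySem.List.pyGet? t ((k.length : Nat) : Int) = some c := by
        rw [PySem.List.pyGet?_natCast, ← hsplit, hd,
          List.getElem?_append_right (Nat.le_refl _)]
        simp
      rw [hsome]
      simp [Option.all, hc]

-- one iteration of A's loop, collapsed: it fires exactly when the leading word is k
lemma loopA_cons (t k v : List Char) (rest : List (List Char × List Char))
    (hk : ∀ c ∈ k, PySem.Chars.isalpha c = true) :
    loopA t ((k, v) :: rest)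
      = if t.takeWhile PySem.Chars.isalpha = k then v ++ t.drop k.length
        else loopA t rest := by
  simp only [loopA]
  by_cases hw : t.takeWhile PySem.Chars.isalpha = k
  · have h2 := (cond2_word t k hk).mpr hw
    rw [Bool.and_eq_true] at h2
    rw [if_pos hw]
    by_cases h1 : PySem.Chars.startswith t (k ++ [' ']) = true
    · rw [if_pos h1]
    · rw [if_neg h1, if_pos h2.1, if_pos h2.2]
  · rw [if_neg hw]
    have h1 : ¬ (PySem.Chars.startswith t (k ++ [' ']) = true) := fun h => hw (cond1_word t k hk h)
    rw [if_neg h1]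
    by_cases hs : PySem.Chars.startswith t k = true
    · rw [if_pos hs]
      have hb : ¬ (((t.length == k.length) || !(Option.all PySem.Chars.isalpha (PySem.List.pyGet? t (k.length : Int)))) = true) := by
        intro hbb
        exact hw ((cond2_word t k hk).mp (by rw [Bool.and_eq_true]; exact ⟨hs, hbb⟩))
      rw [if_neg hb]
    · rw [if_neg hs]

-- A's whole loop is a first-match association lookup of the leading word
lemma loopA_lookup (t : List Char) (ps : List (List Char × List Char))
    (hps : ∀ p ∈ ps, ∀ c ∈ p.1, PySem.Chars.isalpha c = true) :
    loopA t ps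
      = match List.lookup (t.takeWhile PySem.Chars.isalpha) ps with
        | some v => v ++ t.drop (t.takeWhile PySem.Chars.isalpha).length
        | none => t := by
  induction ps with
  | nil => simp [loopA, List.lookup]
  | cons p rest ih =>
    obtain ⟨k, v⟩ := p
    have hk := hps (k, v) (List.mem_cons_self ..)
    rw [loopA_cons t k v rest hk]
    by_cases hw : t.takeWhile PySem.Chars.isalpha = k
    · rw [if_pos hw]
      simp [List.lookup, hw]
    · rw [if_neg hw]
      have hne : (t.takeWhile PySem.Chars.isalpha == k) = false := by
        simp [hw]
      rw [ih (fun p hp => hps p (List.mem_cons_of_mem _ hp))]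
      simp [List.lookup, hne]

-- first-match lookup misses keys that are not present
lemma lookup_eq_none_of_not_mem (l : List (List Char × List Char)) (a : List Char)
    (h : a ∉ l.map Prod.fst) : List.lookup a l = none := by
  induction l with
  | nil => rfl
  | cons p rest ih =>
    simp only [List.map_cons, List.mem_cons, not_or] at h
    have : (a == p.1) = false := by simp [h.1]
    simp [List.lookup, this, ih h.2]

-- B's morphological rule computes exactly A's table lookup, for every word
lemma rule_eq_lookup (w : List Char) :
    replacementFor w = List.lookup w replacementsA := by
  by_cases h : w ∈ replacementsA.map Prod.fst
  · simp only [replacementsA, List.map_cons, List.map_nil, List.mem_cons,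
      List.not_mem_nil, or_false] at h
    rcases h with rfl|rfl|rfl|rfl|rfl|rfl|rfl|rfl|rfl|rfl|rfl|rfl|rfl|rfl|rfl|rfl|rfl|rfl|rfl
    all_goals decide
  · rw [lookup_eq_none_of_not_mem _ _ h]
    have hsub : ∀ x ∈ useWords ++ dropSWords ++ ["Specifies".toList],
        x ∈ replacementsA.map Prod.fst := by decide
    have h1 : w ∉ useWords := fun hm => h (hsub w (by simp [hm]))
    have h2 : w ≠ "Specifies".toList := fun hm => h (hsub w (by simp [hm]))
    have h3 : w ∉ dropSWords := fun hm => h (hsub w (by simp [hm]))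
    have h2' : ¬ w = ['S','p','e','c','i','f','i','e','s'] := by simpa using h2
    simp [replacementFor, h1, h2', h3]

-- ===== VERDICT (by name: the statement is the Claim_ definition above) =====
set_option maxRecDepth 20000 in
theorem convert_to_imperative_mood_spec : Claim_equal_convert_to_imperative_mood := by
  intro text _
  unfold Spec_convert_to_imperative_mood convert_to_imperative_mood convert_to_imperative_mood_alt
  by_cases h0 : PySem.Str.len text = 0
  · have he : text = "" := String.toList_eq_nil_iff.mp
      (List.eq_nil_of_length_eq_zero (by simpa [PySem.Str.len] using h0))
    simp [he]
  · simp only [h0, if_false]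
    set t := text.toList with ht
    set w := t.takeWhile PySem.Chars.isalpha with hwdef
    have htake : t.take w.length = w := ((List.prefix_iff_eq_take).mp (List.takeWhile_prefix _)).symm
    have hkeysB : (replacementsA.all (fun p => p.1.all PySem.Chars.isalpha)) = true := by decide
    have hkeys : ∀ p ∈ replacementsA, ∀ c ∈ p.1, PySem.Chars.isalpha c = true := by
      simpa [List.all_eq_true] using hkeysB
    rw [loopA_lookup t replacementsA hkeys]
    simp only [← hwdef]
    rw [htake, rule_eq_lookup]
    cases hl : List.lookup w replacementsA with
    | none => exact String.ofList_toList
    | some v => simp
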